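-- pv_equiv track=rewrite | github.com/morpheuskn/Trabalhos-de-Computa-o-1 | .github/workflows/lista3izacdepaula.py | soma1
-- ===== SOURCE A (Python) =====
-- def soma1 (a,b):
--   soma = 0
--   if a < b:
--     while a <= b:
--       if ((a % 2 != 0) or (a % 3 != 0)) and ((a % 2 == 0) or (a % 3 == 0)):
--         soma += a
--       a = a+1
--   elif b < a:
--     while b <= a:
--       if ((b % 2 != 0) or (b % 3 != 0)) and ((b % 2 == 0) or (b % 3 == 0)):
--         soma += b
--       b = b+1
--   return soma
-- ===== SOURCE B (Python) =====
-- def soma1(a, b):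
--     lo, hi = (a, b) if a < b else (b, a)
--     def tri(n):
--         return n * (n + 1) // 2
--     def msum(k):
--         return k * (tri(hi // k) - tri((lo - 1) // k))
--     return msum(2) + msum(3) - 2 * msum(6)
-- ===== Notes on version B (the rewrite author's own statement) =====
-- stated objective: faster
-- what changed: B replaces A's element-by-element loop over the range with a closed-form arithmetic-series formula (sum of multiples of 2 plus multiples of 3 minus twice multiples of 6), O(1) instead of O(|b-a|).
-- intended difference: When a == b and that single number is divisible by 2 or 3 but not 6, A returns 0 (its a<b / b<a branches both skip the one-point range) while B returns a, which is the intended sum over the inclusive range. — e.g. on soma1(2, 2): A returns 0, B returns 2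
import Mathlib
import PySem

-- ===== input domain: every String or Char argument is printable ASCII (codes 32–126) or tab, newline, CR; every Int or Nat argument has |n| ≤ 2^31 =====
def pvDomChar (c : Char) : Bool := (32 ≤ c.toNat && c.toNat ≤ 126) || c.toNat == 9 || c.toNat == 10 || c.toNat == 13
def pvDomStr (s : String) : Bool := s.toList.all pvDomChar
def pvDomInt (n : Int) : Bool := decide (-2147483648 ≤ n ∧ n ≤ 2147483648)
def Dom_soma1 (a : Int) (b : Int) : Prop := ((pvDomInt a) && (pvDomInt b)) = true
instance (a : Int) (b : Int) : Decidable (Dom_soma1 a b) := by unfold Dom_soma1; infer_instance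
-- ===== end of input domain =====

-- B computes the range sum in closed form (arithmetic series for multiples of 2 and 3 minus twice multiples of 6) instead of A's per-element loop. A returns 0 when a = b even if that single number qualifies; B includes it (see D_soma1).


-- ===== PORT A =====
-- the loop-body condition: ((x % 2 != 0) or (x % 3 != 0)) and ((x % 2 == 0) or (x % 3 == 0))
def soma1Cond (x : Int) : Bool :=
  (!(PySem.Int.mod x 2 == 0) || !(PySem.Int.mod x 3 == 0)) &&
  ((PySem.Int.mod x 2 == 0) || (PySem.Int.mod x 3 == 0))

-- the while loop: `while x <= b: if cond: soma += x; x = x + 1`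
-- (structural recursion on the iteration count b + 1 - x; guard and body are A's)
def soma1Go : Nat → Int → Int → Int → Int
  | 0, _, _, soma => soma
  | n + 1, x, b, soma =>
      if x ≤ b then soma1Go n (x + 1) b (if soma1Cond x then soma + x else soma)
      else soma

def soma1While (x b soma : Int) : Int := soma1Go (b + 1 - x).toNat x b soma

def soma1 (a : Int) (b : Int) : Int :=
  if a < b then soma1While a b 0
  else if b < a then soma1While b a 0
  else 0

-- ===== PORT B =====
def triB (n : Int) : Int := PySem.Int.floordiv (n * (n + 1)) 2

def msumB (k lo hi : Int) : Int :=
  k * (triB (PySem.Int.floordiv hi k) - triB (PySem.Int.floordiv (lo - 1) k))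

def soma1_alt (a : Int) (b : Int) : Int :=
  let lo := if a < b then a else b
  let hi := if a < b then b else a
  msumB 2 lo hi + msumB 3 lo hi - 2 * msumB 6 lo hi

-- ===== PRECONDITION & SPEC =====
-- When a = b and that single number is divisible by 2 or 3 but not by 6, A returns 0
-- (both its range branches skip the one-point range) while B returns a, the intended
-- sum over the inclusive range.
def D_soma1 (a : Int) (b : Int) : Prop :=
  a = b ∧ (2 ∣ a ∨ 3 ∣ a) ∧ ¬ (6 ∣ a)
instance (a : Int) (b : Int) : Decidable (D_soma1 a b) := by unfold D_soma1; infer_instance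

def Spec_soma1 (a : Int) (b : Int) (out : Int) : Prop := ¬ D_soma1 a b → out = soma1_alt a b
instance (a : Int) (b : Int) (out : Int) : Decidable (Spec_soma1 a b out) := by unfold Spec_soma1; infer_instance

def pvDiffWitness_soma1 : Int × Int := (2, 2)
def pvDiffWitnessOut_soma1 : Int × Int := (0, 2)

-- ===== CLAIM (what is proved, stated in full; the proofs are below) =====
def Claim_unchanged_soma1 : Prop := ∀ (a : Int) (b : Int), Dom_soma1 a b → Spec_soma1 a b (soma1 a b)
def Claim_changed_soma1 : Prop := Dom_soma1 (pvDiffWitness_soma1.1) (pvDiffWitness_soma1.2) ∧ D_soma1 (pvDiffWitness_soma1.1) (pvDiffWitness_soma1.2) ∧ soma1 (pvDiffWitness_soma1.1) (pvDiffWitness_soma1.2) = pvDiffWitnessOut_soma1.1 ∧ soma1_alt (pvDiffWitness_soma1.1) (pvDiffWitness_soma1.2) = pvDiffWitnessOut_soma1.2 ∧ pvDiffWitnessOut_soma1.1 ≠ pvDiffWitnessOut_soma1.2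
def Claim_exact_soma1 : Prop := ∀ (a : Int) (b : Int), Dom_soma1 a b → D_soma1 a b → soma1 a b ≠ soma1_alt a b

-- ===== LEMMAS AND PROOFS =====

-- the closed form with a variable lower end
def closedB (x hi : Int) : Int := msumB 2 x hi + msumB 3 x hi - 2 * msumB 6 x hi

theorem cond_iff (x : Int) : soma1Cond x = true ↔ ((2 ∣ x ∨ 3 ∣ x) ∧ ¬ (6 ∣ x)) := by
  unfold soma1Cond
  have e2 := PySem.Int.mod_eq_zero_iff_dvd x 2
  have e3 := PySem.Int.mod_eq_zero_iff_dvd x 3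
  have h26 : (6 : Int) ∣ x ↔ ((2 : Int) ∣ x ∧ (3 : Int) ∣ x) := by omega
  simp only [Bool.and_eq_true, Bool.or_eq_true, Bool.not_eq_true', beq_iff_eq,
    beq_eq_false_iff_ne, ne_eq, e2, e3, h26]
  tauto

theorem tri2 (n : Int) : 2 * triB n = n * (n + 1) := by
  have h2 : (2 : Int) ∣ n * (n + 1) := Int.even_mul_succ_self n |>.two_dvd
  have := PySem.Int.floordiv_mul_add_mod (n * (n + 1)) 2
  have hm : PySem.Int.mod (n * (n + 1)) 2 = 0 :=
    (PySem.Int.mod_eq_zero_iff_dvd _ _).mpr h2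
  unfold triB
  omega

theorem triB_step (d : Int) : triB d - triB (d - 1) = d := by
  have h1 := tri2 d
  have h2 := tri2 (d - 1)
  have : (d - 1) * (d - 1 + 1) = d * (d + 1) - 2 * d := by ring
  omega

-- floor((x-1)/k) for positive k: drops by one exactly at multiples of k
theorem fdiv_pred (k x : Int) (hk : 0 < k) :
    PySem.Int.floordiv (x - 1) k =
      if k ∣ x then PySem.Int.floordiv x k - 1 else PySem.Int.floordiv x k := by
  have h1 := PySem.Int.floordiv_mul_add_mod x k
  have h2 := PySem.Int.floordiv_mul_add_mod (x - 1) k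
  have hm1 := PySem.Int.mod_nonneg x hk
  have hm2 := PySem.Int.mod_lt x hk
  have hm3 := PySem.Int.mod_nonneg (x - 1) hk
  have hm4 := PySem.Int.mod_lt (x - 1) hk
  have hdvd : k ∣ x ↔ PySem.Int.mod x k = 0 := (PySem.Int.mod_eq_zero_iff_dvd x k).symm
  set d := PySem.Int.floordiv x k with hd
  set d' := PySem.Int.floordiv (x - 1) k with hd'
  set r := PySem.Int.mod x k with hr
  set r' := PySem.Int.mod (x - 1) k with hr'
  have key : d * k - d' * k = r' - r + 1 := by linarith
  split_ifs with h
  · -- r = 0, so (d - d') * k = r' + 1 ∈ [1, k]: forces d - d' = 1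
    have h0 : r = 0 := hdvd.mp h
    have hkey : (d - d') * k = r' + 1 := by rw [sub_mul]; linarith
    have : d - d' = 1 := by
      rcases lt_trichotomy (d - d') 1 with hm | hm | hm
      · have hle : d - d' ≤ 0 := by omega
        have := mul_le_mul_of_nonneg_right hle (le_of_lt hk)
        simp at this
        linarith
      · exact hm
      · have h2m : (2 : Int) ≤ d - d' := by omega
        have := mul_le_mul_of_nonneg_right h2m (le_of_lt hk)
        linarith
    omega
  · -- r ≥ 1, so (d - d') * k = r' - r + 1 ∈ (-k, k): forces d - d' = 0
    have h0 : r ≠ 0 := fun hh => h (hdvd.mpr hh)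
    have hr1 : 1 ≤ r := by omega
    have hkey : (d - d') * k = r' - r + 1 := by rw [sub_mul]; linarith
    have : d - d' = 0 := by
      rcases lt_trichotomy (d - d') 0 with hm | hm | hm
      · have hle : d - d' ≤ -1 := by omega
        have := mul_le_mul_of_nonneg_right hle (le_of_lt hk)
        linarith
      · exact hm
      · have h1m : (1 : Int) ≤ d - d' := by omega
        have := mul_le_mul_of_nonneg_right h1m (le_of_lt hk)
        linarith
    omega

theorem msumB_step (k x hi : Int) (hk : 0 < k) :
    msumB k x hi = (if k ∣ x then x else 0) + msumB k (x + 1) hi := by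
  unfold msumB
  have hp := fdiv_pred k x hk
  have hmul := PySem.Int.floordiv_mul_add_mod x k
  have hmod : k ∣ x ↔ PySem.Int.mod x k = 0 := (PySem.Int.mod_eq_zero_iff_dvd x k).symm
  have hsimp : x + 1 - 1 = x := by ring
  rw [hsimp]
  split_ifs with h
  · rw [hp, if_pos h]
    have hst := triB_step (PySem.Int.floordiv x k)
    have h0 : PySem.Int.mod x k = 0 := hmod.mp h
    nlinarith
  · rw [hp, if_neg h]; ring

theorem closedB_step (x hi : Int) :
    closedB x hi = (if soma1Cond x then x else 0) + closedB (x + 1) hi := by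
  unfold closedB
  have h2 := msumB_step 2 x hi (by omega)
  have h3 := msumB_step 3 x hi (by omega)
  have h6 := msumB_step 6 x hi (by omega)
  have h26 : (6 : Int) ∣ x ↔ ((2 : Int) ∣ x ∧ (3 : Int) ∣ x) := by omega
  by_cases hcx : soma1Cond x = true
  · rw [if_pos hcx]
    rcases (cond_iff x).mp hcx with ⟨hor, h6n⟩
    rcases hor with h2x | h3x
    · by_cases h3x : (3 : Int) ∣ x
      · exact absurd (h26.mpr ⟨h2x, h3x⟩) h6n
      · rw [if_pos h2x] at h2; rw [if_neg h3x] at h3; rw [if_neg h6n] at h6; omega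
    · by_cases h2x : (2 : Int) ∣ x
      · exact absurd (h26.mpr ⟨h2x, h3x⟩) h6n
      · rw [if_neg h2x] at h2; rw [if_pos h3x] at h3; rw [if_neg h6n] at h6; omega
  · rw [if_neg hcx]
    have hnot : ¬ ((2 ∣ x ∨ 3 ∣ x) ∧ ¬ (6 ∣ x)) := fun hh => hcx ((cond_iff x).mpr hh)
    by_cases h2x : (2 : Int) ∣ x <;> by_cases h3x : (3 : Int) ∣ x
    · have h6x : (6 : Int) ∣ x := h26.mpr ⟨h2x, h3x⟩
      rw [if_pos h2x] at h2; rw [if_pos h3x] at h3; rw [if_pos h6x] at h6; omega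
    · exact absurd ⟨Or.inl h2x, fun hh => h3x (h26.mp hh).2⟩ hnot
    · exact absurd ⟨Or.inr h3x, fun hh => h2x (h26.mp hh).1⟩ hnot
    · have h6n : ¬ (6 : Int) ∣ x := fun hh => h2x (h26.mp hh).1
      rw [if_neg h2x] at h2; rw [if_neg h3x] at h3; rw [if_neg h6n] at h6; omega

theorem closedB_empty (hi : Int) : closedB (hi + 1) hi = 0 := by
  unfold closedB msumB
  have h : hi + 1 - 1 = hi := by ring
  rw [h]; ring

theorem soma1Go_eq (b : Int) : ∀ (n : Nat) (x soma : Int), x ≤ b + 1 →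
    (b + 1 - x).toNat = n → soma1Go n x b soma = soma + closedB x b := by
  intro n
  induction n with
  | zero =>
      intro x soma hx hn
      have hx1 : x = b + 1 := by omega
      rw [soma1Go, hx1, closedB_empty]; ring
  | succ n ih =>
      intro x soma hx hn
      have hxb : x ≤ b := by omega
      rw [soma1Go, if_pos hxb, ih (x + 1) _ (by omega) (by omega), closedB_step x b]
      split_ifs <;> ring

theorem soma1While_eq (b : Int) : ∀ x soma : Int, x ≤ b + 1 →
    soma1While x b soma = soma + closedB x b := by
  intro x soma hx
  exact soma1Go_eq b _ x soma hx rfl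

theorem closedB_single (a : Int) :
    closedB a a = if soma1Cond a then a else 0 := by
  rw [closedB_step a a, closedB_empty]; ring

theorem soma1_alt_eq_closed (a b : Int) :
    soma1_alt a b = closedB (if a < b then a else b) (if a < b then b else a) := by
  unfold soma1_alt closedB; rfl

-- ===== VERDICT (by name: the statement is the Claim_ definition above) =====
theorem soma1_spec : Claim_unchanged_soma1 := by
  intro a b _ hD
  rw [soma1_alt_eq_closed]
  unfold soma1
  rcases lt_trichotomy a b with h | h | h
  · simp only [if_pos h]
    rw [soma1While_eq b a 0 (by omega)]; ring
  · subst h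
    simp only [lt_irrefl a, if_false]
    rw [closedB_single]
    by_cases hc : soma1Cond a = true
    · exact absurd ⟨rfl, (cond_iff a).mp hc⟩ hD
    · rw [if_neg hc]
  · have hnlt : ¬ a < b := by omega
    simp only [if_neg hnlt, if_pos h]
    rw [soma1While_eq a b 0 (by omega)]; ring

theorem soma1_changed : Claim_changed_soma1 := by
  unfold Claim_changed_soma1
  refine ⟨by decide, by decide, ?_, by decide, by decide⟩
  show soma1 2 2 = 0
  unfold soma1
  norm_num

theorem soma1_tight : Claim_exact_soma1 := by
  intro a b _ hD
  rcases hD with ⟨hab, hor, h6⟩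
  subst hab
  have hA : soma1 a a = 0 := by unfold soma1; simp
  have hcond : soma1Cond a = true := (cond_iff a).mpr ⟨hor, h6⟩
  have hB : soma1_alt a a = a := by
    rw [soma1_alt_eq_closed]
    simp only [lt_irrefl a, if_false]
    rw [closedB_single, if_pos hcond]
  rw [hA, hB]
  intro h
  have : a ≠ 0 := fun h0 => by subst h0; exact h6 ⟨0, by ring⟩
  omega
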